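-- pv_equiv track=rewrite | github.com/cristian20021/LeetCode | 2421-maximum-number-of-pairs-in-array/2421-maximum-number-of-pairs-in-array.py | numberOfPairs
-- ===== SOURCE A (Python) =====
-- def numberOfPairs(nums):
--     pairs = 0
--     single = []
--
--     for num in nums:
--                 if num in single:
--                     single.remove(num)
--                     pairs += 1
--                 else:
--                     single.append(num)
--
--     return [pairs, len(single)]
-- ===== SOURCE B (Python) =====
-- def numberOfPairs(nums):
--     cnt = {}
--     for num in nums:
--         cnt[num] = cnt.get(num, 0) + 1
--     pairs = sum(c // 2 for c in cnt.values())
--     return [pairs, len(nums) - 2 * pairs]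
-- ===== Notes on version B (the rewrite author's own statement) =====
-- stated objective: faster
-- what changed: Replaced A's quadratic membership-toggle over a growing 'single' list with a one-pass frequency dict; pairs = sum of count//2 and leftovers derived arithmetically as len(nums) - 2*pairs.
import Mathlib
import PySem

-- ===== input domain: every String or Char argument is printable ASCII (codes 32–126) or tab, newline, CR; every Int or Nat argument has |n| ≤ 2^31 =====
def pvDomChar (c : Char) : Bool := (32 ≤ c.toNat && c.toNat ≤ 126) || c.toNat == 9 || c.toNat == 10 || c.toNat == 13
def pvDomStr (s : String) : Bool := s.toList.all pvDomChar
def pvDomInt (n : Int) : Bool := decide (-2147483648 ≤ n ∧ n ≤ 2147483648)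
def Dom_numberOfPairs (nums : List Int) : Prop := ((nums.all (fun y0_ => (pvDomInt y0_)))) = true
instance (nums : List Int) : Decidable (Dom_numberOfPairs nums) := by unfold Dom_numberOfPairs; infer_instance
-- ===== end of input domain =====

-- B replaces A's quadratic membership-toggle over a 'single' list with a one-pass
-- frequency dict: pairs = sum of count // 2, leftovers = len(nums) - 2*pairs (faster).

-- ===== PORT A =====
def numberOfPairs (nums : List Int) : List Int :=
  let st := nums.foldl
    (fun (st : Int × List Int) num =>
      if num ∈ st.2 then (st.1 + 1, st.2.erase num)   -- single.remove(num); pairs += 1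
      else (st.1, st.2 ++ [num]))                     -- single.append(num)
    (0, [])
  [st.1, (st.2.length : Int)]

-- ===== PORT B =====
def numberOfPairs_alt (nums : List Int) : List Int :=
  let cnt := nums.foldl (fun d x => d.insert x (d.getD x 0 + 1))
    (PySem.Dict.empty : PySem.Dict Int Int)           -- cnt[num] = cnt.get(num, 0) + 1
  let pairs := (PySem.Dict.values cnt).foldl (fun s c => s + PySem.Int.floordiv c 2) 0
  [pairs, (nums.length : Int) - 2 * pairs]

-- ===== PRECONDITION & SPEC =====
def Spec_numberOfPairs (nums : List Int) (out : List Int) : Prop := out = numberOfPairs_alt nums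
instance (nums : List Int) (out : List Int) : Decidable (Spec_numberOfPairs nums out) := by unfold Spec_numberOfPairs; infer_instance

-- ===== CLAIM (what is proved, stated in full; the proofs are below) =====
def Claim_equal_numberOfPairs : Prop := ∀ (nums : List Int), Dom_numberOfPairs nums → Spec_numberOfPairs nums (numberOfPairs nums)

-- ===== LEMMAS AND PROOFS =====

/-- Number of completed pairs in `p`: sum over the distinct values of `count / 2`. -/
def pairsNat (p : List Int) : Nat :=
  ((PySem.Set.ofList p).map (fun k => p.count k / 2)).sum

/-- Sum over a duplicate-free list when the summand changes only at one member. -/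
lemma sum_map_delta (S : List Int) (f g : Int → Nat) (num : Int) (d : Nat)
    (hS : S.Nodup) (hmem : num ∈ S)
    (hagree : ∀ k ∈ S, k ≠ num → g k = f k) (hnum : g num = f num + d) :
    (S.map g).sum = (S.map f).sum + d := by
  induction S with
  | nil => cases hmem
  | cons a S ih =>
    rcases List.nodup_cons.mp hS with ⟨ha, hS'⟩
    by_cases hanum : a = num
    · subst hanum
      have hrest : ∀ k ∈ S, g k = f k := fun k hk =>
        hagree k (List.mem_cons_of_mem _ hk) (fun h => ha (h ▸ hk))
      simp [List.map_congr_left hrest, hnum]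
      omega
    · have hmem' : num ∈ S := by
        rcases List.mem_cons.mp hmem with h | h
        · exact absurd h.symm hanum
        · exact h
      have := ih hS' hmem' (fun k hk => hagree k (List.mem_cons_of_mem _ hk))
      simp [hagree a (List.mem_cons_self) hanum, this]
      omega

lemma ofList_append_singleton (p : List Int) (num : Int) :
    PySem.Set.ofList (p ++ [num]) =
      if num ∈ p then PySem.Set.ofList p else PySem.Set.ofList p ++ [num] := by
  rw [PySem.Set.ofList_eq_foldl, List.foldl_append, ← PySem.Set.ofList_eq_foldl]
  simp [PySem.Set.add, PySem.Set.contains]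

lemma pairsNat_append (p : List Int) (num : Int) :
    pairsNat (p ++ [num]) = pairsNat p + (if p.count num % 2 = 1 then 1 else 0) := by
  unfold pairsNat
  rw [ofList_append_singleton]
  by_cases hmem : num ∈ p
  · simp only [hmem, if_true]
    have hmemS : num ∈ PySem.Set.ofList p := by
      simpa [PySem.Set.mem_ofList] using hmem
    rcases Nat.mod_two_eq_zero_or_one (p.count num) with hpar | hpar
    · -- even count: (c+1)/2 = c/2
      simp only [hpar]
      rw [sum_map_delta (PySem.Set.ofList p)
            (fun k => p.count k / 2) (fun k => (p ++ [num]).count k / 2) num 0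
            (PySem.Set.nodup_ofList p) hmemS
            (fun k _ hk => by simp [List.count_append, List.count_singleton, Ne.symm hk])
            (by simp [List.count_append, List.count_singleton]; omega)]
      simp
    · simp only [hpar]
      rw [sum_map_delta (PySem.Set.ofList p)
            (fun k => p.count k / 2) (fun k => (p ++ [num]).count k / 2) num 1
            (PySem.Set.nodup_ofList p) hmemS
            (fun k _ hk => by simp [List.count_append, List.count_singleton, Ne.symm hk])
            (by simp [List.count_append, List.count_singleton]; omega)]
      simp
  · simp only [hmem, if_false]
    have hc0 : p.count num = 0 := List.count_eq_zero.mpr hmem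
    have hcongr : ∀ k ∈ PySem.Set.ofList p,
        (p ++ [num]).count k / 2 = p.count k / 2 := by
      intro k hk
      have hkp : k ∈ p := (PySem.Set.mem_ofList _ _).mp hk
      have : k ≠ num := fun h => hmem (h ▸ hkp)
      simp [List.count_append, List.count_singleton, Ne.symm this]
    simp only [List.map_append, List.map_singleton, List.sum_append, List.sum_singleton]
    rw [List.map_congr_left hcongr]
    simp [List.count_append, hc0]

lemma count_app_ne (x num : Int) (p : List Int) (h : x ≠ num) :
    (p ++ [num]).count x = p.count x := by
  simp [List.count_append, List.count_singleton', Ne.symm h]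

lemma count_app_self (num : Int) (p : List Int) :
    (p ++ [num]).count num = p.count num + 1 := by
  simp [List.count_append]

lemma loopA_inv (l : List Int) : ∀ (p : List Int) (pairs : Int) (single : List Int),
    single.Nodup →
    (∀ x, x ∈ single ↔ p.count x % 2 = 1) →
    pairs = (pairsNat p : Int) →
    2 * pairs + (single.length : Int) = (p.length : Int) →
    (l.foldl (fun (st : Int × List Int) num =>
        if num ∈ st.2 then (st.1 + 1, st.2.erase num)
        else (st.1, st.2 ++ [num])) (pairs, single)).1 = (pairsNat (p ++ l) : Int) ∧
    2 * (pairsNat (p ++ l) : Int) +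
      (((l.foldl (fun (st : Int × List Int) num =>
        if num ∈ st.2 then (st.1 + 1, st.2.erase num)
        else (st.1, st.2 ++ [num])) (pairs, single)).2.length : Int)) = ((p ++ l).length : Int) := by
  induction l with
  | nil =>
    intro p pairs single _ _ h3 h4
    refine ⟨by simpa using h3, ?_⟩
    simpa [← h3] using h4
  | cons num l ih =>
    intro p pairs single h1 h2 h3 h4
    have hrw : p ++ num :: l = (p ++ [num]) ++ l := by simp
    rw [hrw, List.foldl_cons]
    by_cases hmem : num ∈ single
    · have hodd : p.count num % 2 = 1 := (h2 num).mp hmem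
      have hlen1 : 0 < single.length := List.length_pos_of_mem hmem
      simp only [hmem, if_true]
      apply ih (p ++ [num]) (pairs + 1) (single.erase num)
      · exact h1.erase num
      · intro x
        rw [List.Nodup.mem_erase_iff h1]
        by_cases hx : x = num
        · subst hx
          simp [count_app_self]
          omega
        · rw [count_app_ne x num p hx]
          simp [hx, h2 x]
      · rw [pairsNat_append, hodd]
        push_cast
        omega
      · rw [List.length_erase_of_mem hmem]
        simp only [List.length_append, List.length_singleton]
        push_cast [Nat.cast_sub hlen1]
        omega
    · have heven : p.count num % 2 = 0 := by
        have hn1 : ¬p.count num % 2 = 1 := fun h => hmem ((h2 num).mpr h)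
        omega
      simp only [hmem, if_false]
      apply ih (p ++ [num]) pairs (single ++ [num])
      · exact List.Nodup.append h1 (List.nodup_singleton num)
          (by simp only [List.disjoint_singleton]; exact hmem)
      · intro x
        by_cases hx : x = num
        · subst hx
          simp [count_app_self]
          omega
        · rw [count_app_ne x num p hx]
          simp [hx, h2 x]
      · rw [pairsNat_append, heven]
        simpa using h3
      · push_cast [List.length_append]
        omega
-- ===== VERDICT (by name: the statement is the Claim_ definition above) =====
theorem numberOfPairs_spec : Claim_equal_numberOfPairs := by
  intro nums _
  unfold Spec_numberOfPairs numberOfPairs numberOfPairs_alt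
  obtain ⟨hf, hl⟩ := loopA_inv nums [] 0 [] List.nodup_nil (by simp) (by rfl) (by simp)
  simp only [List.nil_append] at hf hl
  have hB : (PySem.Dict.values (PySem.Dict.counter nums)).foldl
      (fun s c => s + PySem.Int.floordiv c 2) 0 = (pairsNat nums : Int) := by
    rw [PySem.List.foldl_add]
    simp only [PySem.Dict.values, PySem.Dict.items_counter, List.map_map, Function.comp_def]
    unfold pairsNat
    have h : ∀ k ∈ PySem.Set.ofList nums,
        PySem.Int.floordiv ((List.count k nums : Nat) : Int) 2
          = ((List.count k nums / 2 : Nat) : Int) := by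
      intro k _
      exact_mod_cast PySem.Int.floordiv_natCast (List.count k nums) 2
    rw [List.map_congr_left h, Nat.cast_list_sum, List.map_map]
    simp [Function.comp_def]
  simp only [PySem.Dict.foldl_insert_getD_add_one_eq_counter, hf, hB]
  have hlen : ((List.foldl (fun (st : Int × List Int) num =>
      if num ∈ st.2 then (st.1 + 1, st.2.erase num)
      else (st.1, st.2 ++ [num])) (0, []) nums).2.length : Int)
      = (nums.length : Int) - 2 * (pairsNat nums : Int) := by omega
  rw [hlen]
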